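-- pv_equiv track=rewrite | github.com/MIT-Emerging-Talent/2023-group-11-collaboration-practice | src/backtracking/python/string_pattern/src/string_pattern.py | string_pattern
-- ===== SOURCE A (Python) =====
-- def string_pattern(string, pattern):
--     """
--     Check if a pattern can be uniquely mapped to a substring of the given string.
--
--     Each unique character in the pattern must correspond to a unique character in the string.
--
--     Parameters:
--     string (str): The string in which the pattern is to be matched.
--     pattern (str): The pattern that needs to be matched within the string.
--
--     Returns:
--     bool: True if the pattern can be uniquely mapped to a substring of the string, False otherwise.
--     """
--     for i in range(len(string) - len(pattern) + 1):
--         mapping = {}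
--         used_chars = set()
--         for j in range(len(pattern)):
--             pat_char = pattern[j]
--             str_char = string[i + j]
--
--             if pat_char in mapping:
--                 if mapping[pat_char] != str_char:
--                     break
--             else:
--                 if str_char in used_chars:
--                     break
--                 mapping[pat_char] = str_char
--                 used_chars.add(str_char)
--         else:
--             return True
--
--     return False
-- ===== SOURCE B (Python) =====
-- def _canon(s):
--     """Canonical form: each char replaced by the index of its first occurrence."""
--     first = {}
--     out = []
--     for j, ch in enumerate(s):
--         if ch not in first:
--             first[ch] = j
--         out.append(first[ch])
--     return out
--
--
-- def string_pattern(string, pattern):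
--     m = len(pattern)
--     if m > len(string):
--         return False
--     pc = _canon(pattern)
--     return any(_canon(string[i:i + m]) == pc for i in range(len(string) - m + 1))
-- ===== Notes on version B (the rewrite author's own statement) =====
-- stated objective: alternative
-- what changed: B replaces A's per-window dict/set mapping-consistency check by a normalization algorithm: it canonicalizes the pattern once into its first-occurrence-index sequence and tests each window by comparing canonical encodings for equality.
import Mathlib
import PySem

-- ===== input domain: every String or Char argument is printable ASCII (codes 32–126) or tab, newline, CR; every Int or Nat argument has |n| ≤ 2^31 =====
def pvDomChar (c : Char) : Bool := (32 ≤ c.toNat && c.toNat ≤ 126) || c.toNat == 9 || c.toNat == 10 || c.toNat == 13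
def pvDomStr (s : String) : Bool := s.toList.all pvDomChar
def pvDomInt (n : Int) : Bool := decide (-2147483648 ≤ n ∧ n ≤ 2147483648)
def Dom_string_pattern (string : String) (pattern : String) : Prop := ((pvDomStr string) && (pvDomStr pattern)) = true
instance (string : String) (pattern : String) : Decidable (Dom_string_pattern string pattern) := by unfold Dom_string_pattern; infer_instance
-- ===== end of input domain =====

-- B replaces A's per-window dict/set mapping-consistency check by canonical first-occurrence
-- encodings compared per window (alternative algorithm, same asymptotic cost).

-- ===== PORT A =====
-- inner 'for j' loop of A: walk the (pattern char, string char) pairs keeping the mapping dict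
-- and the used set; false = the loop broke, true = it completed ('else: return True')
def pvLoopA : List (Char × Char) → PySem.Dict Char Char → PySem.Set Char → Bool
  | [], _, _ => true
  | (pc, sc) :: rest, mapping, used =>
    match mapping.get? pc with
    | some v => if v = sc then pvLoopA rest mapping used else false
    | none =>
      if PySem.Set.contains used sc then false
      else pvLoopA rest (mapping.insert pc sc) (PySem.Set.add used sc)

def string_pattern (string : String) (pattern : String) : Bool :=
  (PySem.List.pyRange 0 ((string.toList.length : Int) - (pattern.toList.length : Int) + 1) 1).any
    (fun i =>
      pvLoopA
        (pattern.toList.zip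
          (PySem.List.slice string.toList (some i) (some (i + (pattern.toList.length : Int)))))
        PySem.Dict.empty PySem.Set.empty)

-- ===== PORT B =====
-- _canon: each character replaced by the index of its first occurrence (dict 'first', enumerate)
def pvCanonAux : List Char → Int → PySem.Dict Char Int → List Int → List Int
  | [], _, _, out => out.reverse
  | ch :: rest, j, first, out =>
    let first' := if first.contains ch then first else first.insert ch j
    pvCanonAux rest (j + 1) first' (first'.getD ch 0 :: out)

def pvCanon (l : List Char) : List Int := pvCanonAux l 0 PySem.Dict.empty []

def string_pattern_alt (string : String) (pattern : String) : Bool :=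
  if (pattern.toList.length : Int) > (string.toList.length : Int) then false
  else
    (PySem.List.pyRange 0 ((string.toList.length : Int) - (pattern.toList.length : Int) + 1) 1).any
      (fun i =>
        pvCanon (PySem.List.slice string.toList (some i) (some (i + (pattern.toList.length : Int))))
          == pvCanon pattern.toList)

-- ===== PRECONDITION & SPEC =====
def Spec_string_pattern (string : String) (pattern : String) (out : Bool) : Prop := out = string_pattern_alt string pattern
instance (string : String) (pattern : String) (out : Bool) : Decidable (Spec_string_pattern string pattern out) := by unfold Spec_string_pattern; infer_instance

-- ===== CLAIM (what is proved, stated in full; the proofs are below) =====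
def Claim_equal_string_pattern : Prop := ∀ (string : String) (pattern : String), Dom_string_pattern string pattern → Spec_string_pattern string pattern (string_pattern string pattern)

-- ===== LEMMAS AND PROOFS =====

-- first-occurrence index of character c in l
def pvFirst (l : List Char) (c : Char) : Nat := l.findIdx (· == c)

-- a pair list is a partial bijection: equal firsts iff equal seconds
def pvCompat (ps : List (Char × Char)) : Prop := ∀ q ∈ ps, ∀ q' ∈ ps, (q.1 = q'.1 ↔ q.2 = q'.2)

theorem pvCompat_congr {l₁ l₂ : List (Char × Char)} (h : ∀ x, x ∈ l₁ ↔ x ∈ l₂) :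
    pvCompat l₁ ↔ pvCompat l₂ := by
  constructor <;> intro hc q hq q' hq'
  · exact hc q ((h q).mpr hq) q' ((h q').mpr hq')
  · exact hc q ((h q).mp hq) q' ((h q').mp hq')

theorem pvLoopA_iff : ∀ (rest : List (Char × Char)) (d : PySem.Dict Char Char) (u : PySem.Set Char),
    d.keys.Nodup →
    (∀ c, c ∈ u ↔ ∃ a, d.get? a = some c) →
    pvCompat d.items →
    (pvLoopA rest d u = true ↔ pvCompat (d.items ++ rest)) := by
  intro rest
  induction rest with
  | nil =>
    intro d u hnod hu hcomp
    simpa [pvLoopA] using hcomp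
  | cons q rest ih =>
    obtain ⟨pc, sc⟩ := q
    intro d u hnod hu hcomp
    cases hg : d.get? pc with
    | some v =>
      simp only [pvLoopA, hg]
      by_cases hv : v = sc
      · subst hv
        rw [if_pos rfl, ih d u hnod hu hcomp]
        apply pvCompat_congr
        intro x
        have hmem : (pc, v) ∈ d.items := PySem.Dict.mem_items_of_get?_eq_some d hg
        constructor
        · intro hx
          rcases List.mem_append.mp hx with h | h
          · exact List.mem_append_left _ h
          · exact List.mem_append_right _ (List.mem_cons_of_mem _ h)
        · intro hx
          rcases List.mem_append.mp hx with h | h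
          · exact List.mem_append_left _ h
          · rcases List.mem_cons.mp h with rfl | h
            · exact List.mem_append_left _ hmem
            · exact List.mem_append_right _ h
      · rw [if_neg hv]
        simp only [Bool.false_eq_true, false_iff]
        intro hcp
        have h1 : (pc, v) ∈ d.items ++ (pc, sc) :: rest :=
          List.mem_append_left _ (PySem.Dict.mem_items_of_get?_eq_some d hg)
        have h2 : (pc, sc) ∈ d.items ++ (pc, sc) :: rest :=
          List.mem_append_right _ (List.mem_cons_self)
        exact hv ((hcp _ h1 _ h2).mp rfl)
    | none =>
      simp only [pvLoopA, hg]
      by_cases hc : PySem.Set.contains u sc = true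
      · rw [if_pos hc]
        simp only [Bool.false_eq_true, false_iff]
        intro hcp
        obtain ⟨a, ha⟩ := (hu sc).mp ((PySem.Set.contains_iff u sc).mp hc)
        have hane : a ≠ pc := by
          intro h; rw [h, hg] at ha; cases ha
        have h1 : (a, sc) ∈ d.items ++ (pc, sc) :: rest :=
          List.mem_append_left _ (PySem.Dict.mem_items_of_get?_eq_some d ha)
        have h2 : (pc, sc) ∈ d.items ++ (pc, sc) :: rest :=
          List.mem_append_right _ (List.mem_cons_self)
        exact hane ((hcp _ h1 _ h2).mpr rfl)
      · rw [if_neg hc]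
        have hnotc : d.contains pc = false := by
          rw [PySem.Dict.contains_eq_isSome_get?, hg]; rfl
        have hitems : (d.insert pc sc).items = d.items ++ [(pc, sc)] :=
          PySem.Dict.items_insert_of_not_contains d sc hnotc
        have hscu : sc ∉ u := fun hm => hc ((PySem.Set.contains_iff u sc).mpr hm)
        have hkey : ∀ a b, (a, b) ∈ d.items → a ≠ pc ∧ b ≠ sc := by
          intro a b hab
          have hga : d.get? a = some b := PySem.Dict.get?_of_mem_items d hab hnod
          constructor
          · intro h; rw [h, hg] at hga; cases hga
          · intro h
            exact hscu ((hu sc).mpr ⟨a, by rw [hga, h]⟩)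
        have hnod' : (d.insert pc sc).keys.Nodup :=
          PySem.Dict.nodup_keys_insert d pc sc hnod
        have hu' : ∀ c, c ∈ PySem.Set.add u sc ↔ ∃ a, (d.insert pc sc).get? a = some c := by
          intro c
          rw [PySem.Set.mem_add]
          constructor
          · rintro (hm | rfl)
            · obtain ⟨a, ha⟩ := (hu c).mp hm
              have hane : a ≠ pc := by intro h; rw [h, hg] at ha; cases ha
              exact ⟨a, by rw [PySem.Dict.get?_insert, if_neg hane]; exact ha⟩
            · exact ⟨pc, by rw [PySem.Dict.get?_insert, if_pos rfl]⟩
          · rintro ⟨a, ha⟩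
            rw [PySem.Dict.get?_insert] at ha
            by_cases hap : a = pc
            · rw [if_pos hap] at ha
              right; exact (Option.some.inj ha).symm
            · rw [if_neg hap] at ha
              left; exact (hu c).mpr ⟨a, ha⟩
        have hcomp' : pvCompat (d.insert pc sc).items := by
          rw [hitems]
          intro q hq q' hq'
          rcases List.mem_append.mp hq with h | h
          · rcases List.mem_append.mp hq' with h' | h'
            · exact hcomp q h q' h'
            · rcases List.mem_singleton.mp h' with rfl
              obtain ⟨ha, hb⟩ := hkey q.1 q.2 h
              simp only
              constructor
              · intro he; exact absurd he ha
              · intro he; exact absurd he hb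
          · rcases List.mem_singleton.mp h with rfl
            rcases List.mem_append.mp hq' with h' | h'
            · obtain ⟨ha, hb⟩ := hkey q'.1 q'.2 h'
              simp only
              constructor
              · intro he; exact absurd he.symm ha
              · intro he; exact absurd he.symm hb
            · rcases List.mem_singleton.mp h' with rfl
              simp
        rw [ih (d.insert pc sc) (PySem.Set.add u sc) hnod' hu' hcomp']
        apply pvCompat_congr
        intro x
        rw [hitems]
        simp [List.mem_append]

theorem pvLoopA_zip (l : List (Char × Char)) :
    pvLoopA l PySem.Dict.empty PySem.Set.empty = true ↔ pvCompat l := by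
  have hitems : (PySem.Dict.empty : PySem.Dict Char Char).items = [] := rfl
  have h := pvLoopA_iff l PySem.Dict.empty PySem.Set.empty
    (by rw [show (PySem.Dict.empty : PySem.Dict Char Char).keys = [] from rfl]; exact List.nodup_nil)
    (by intro c; constructor
        · intro hm; cases hm
        · rintro ⟨a, ha⟩; rw [PySem.Dict.get?_empty] at ha; cases ha)
    (by rw [hitems]; intro q hq; cases hq)
  rwa [hitems, List.nil_append] at h

theorem pvFindIdx_congr {α β : Type} (P : α → Bool) (Q : β → Bool) :
    ∀ (xs : List α) (ys : List β), xs.length = ys.length →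
    (∀ k (h1 : k < xs.length) (h2 : k < ys.length), P xs[k] = Q ys[k]) →
    xs.findIdx P = ys.findIdx Q := by
  intro xs
  induction xs with
  | nil => intro ys hlen _; cases ys with
    | nil => rfl
    | cons b u => simp at hlen
  | cons a t ih =>
    intro ys hlen h
    cases ys with
    | nil => simp at hlen
    | cons b u =>
      have h0 : P a = Q b := h 0 (by simp) (by simp)
      simp only [List.findIdx_cons, h0]
      cases hq : Q b with
      | true => simp
      | false =>
        simp only [cond_false]
        have : t.findIdx P = u.findIdx Q := by
          apply ih u (by simpa using hlen)
          intro k h1 h2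
          simpa using h (k + 1) (by simpa using h1) (by simpa using h2)
        rw [this]

theorem pvFirst_lt (l : List Char) (c : Char) (h : c ∈ l) : pvFirst l c < l.length := by
  exact List.findIdx_lt_length_of_exists ⟨c, h, by simp⟩

theorem pvFirst_getElem (l : List Char) (c : Char) (h : c ∈ l) :
    l[pvFirst l c]'(pvFirst_lt l c h) = c := by
  have := @List.findIdx_getElem _ (· == c) l (pvFirst_lt l c h)
  simpa [pvFirst] using this

theorem pv_eq_iff_first_eq (l : List Char) (j k : Nat) (hj : j < l.length) (hk : k < l.length) :
    l[j] = l[k] ↔ pvFirst l l[j] = pvFirst l l[k] := by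
  constructor
  · intro h; rw [h]
  · intro h
    have hj' : l[pvFirst l l[j]]'(pvFirst_lt l l[j] (l.getElem_mem hj)) = l[j] :=
      pvFirst_getElem l l[j] (l.getElem_mem hj)
    have hk' : l[pvFirst l l[k]]'(pvFirst_lt l l[k] (l.getElem_mem hk)) = l[k] :=
      pvFirst_getElem l l[k] (l.getElem_mem hk)
    rw [← hj', ← hk']
    congr 1

theorem pvCompat_zip_iff (p w : List Char) (hl : w.length = p.length) :
    pvCompat (p.zip w) ↔
      ∀ j (hj : j < p.length) (hj' : j < w.length), pvFirst p p[j] = pvFirst w w[j] := by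
  have hmem : ∀ j (hj : j < p.length) (hj' : j < w.length), (p[j], w[j]) ∈ p.zip w := by
    intro j hj hj'
    rw [List.mem_iff_getElem]
    refine ⟨j, by simp [List.length_zip]; omega, by simp [List.getElem_zip]⟩
  constructor
  · intro hc j hj hj'
    apply pvFindIdx_congr (· == p[j]) (· == w[j]) p w hl.symm
    intro k h1 h2
    have := hc _ (hmem k h1 (by omega)) _ (hmem j hj hj')
    simp only at this
    rw [Bool.eq_iff_iff]
    simp [this]
  · intro h q hq q' hq'
    rw [List.mem_iff_getElem] at hq hq'
    obtain ⟨j, hjlt, hqe⟩ := hq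
    obtain ⟨k, hklt, hqe'⟩ := hq'
    simp [List.length_zip] at hjlt hklt
    have hj1 : j < p.length := by omega
    have hj2 : j < w.length := by omega
    have hk1 : k < p.length := by omega
    have hk2 : k < w.length := by omega
    rw [List.getElem_zip] at hqe hqe'
    subst hqe hqe'
    simp only
    rw [pv_eq_iff_first_eq p j k hj1 hk1, pv_eq_iff_first_eq w j k hj2 hk2,
      h j hj1 hj2, h k hk1 hk2]

theorem pvCanonAux_spec (l : List Char) : ∀ (b a : List Char), a ++ b = l →
    ∀ (first : PySem.Dict Char Int) (out : List Int),
    (∀ c, first.get? c = if c ∈ a then some ((pvFirst l c : Int)) else none) →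
    pvCanonAux b (a.length : Int) first out
      = out.reverse ++ b.map (fun c => ((pvFirst l c : Nat) : Int)) := by
  intro b
  induction b with
  | nil => intro a _ first out _; simp [pvCanonAux]
  | cons ch rest ih =>
    intro a hl first out hf
    simp only [pvCanonAux]
    have hcont : first.contains ch = decide (ch ∈ a) := by
      rw [PySem.Dict.contains_eq_isSome_get?, hf ch]
      by_cases h : ch ∈ a <;> simp [h]
    have hlen : (a.length : Int) + 1 = (((a ++ [ch]).length : Nat) : Int) := by
      push_cast [List.length_append]; simp
    by_cases hch : ch ∈ a
    · have hget : first.getD ch 0 = ((pvFirst l ch : Nat) : Int) := by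
        rw [PySem.Dict.getD_eq_get?_getD, hf ch, if_pos hch]
        rfl
      have key := ih (a ++ [ch]) (by simpa using hl) first
        (((pvFirst l ch : Nat) : Int) :: out) ?_
      · rw [hcont]
        simp only [hch, decide_true, if_true, hget, hlen, key]
        simp
      · intro c
        rw [hf c]
        by_cases hc : c ∈ a
        · simp [hc, List.mem_append]
        · have hnc : c ∉ a ++ [ch] := by
            simp only [List.mem_append, List.mem_singleton]
            rintro (h | rfl)
            · exact hc h
            · exact hc hch
          simp [hc, hnc]
    · have hfirst : pvFirst l ch = a.length := by
        rw [← hl]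
        unfold pvFirst
        rw [List.findIdx_append]
        have hna : ¬ (List.findIdx (· == ch) a < a.length) := by
          rw [List.findIdx_lt_length]
          rintro ⟨x, hx, hxe⟩
          exact hch (by simpa using (beq_iff_eq.mp hxe) ▸ hx)
        rw [if_neg hna]
        simp [List.findIdx_cons]
      have key := ih (a ++ [ch]) (by simpa using hl) (first.insert ch (a.length : Int))
        (((pvFirst l ch : Nat) : Int) :: out) ?_
      · rw [hcont]
        have hget : (first.insert ch (a.length : Int)).getD ch 0 = ((pvFirst l ch : Nat) : Int) := by
          rw [PySem.Dict.getD_insert_self, hfirst]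
        simp only [hch, decide_false, if_false, Bool.false_eq_true, hget, hfirst]
        rw [hfirst] at key
        rw [hlen, key]
        simp [hfirst]
      · intro c
        rw [PySem.Dict.get?_insert, hf c]
        by_cases hc : c = ch
        · subst hc; simp [hfirst, hch]
        · by_cases hca : c ∈ a <;> simp [hc, hca, List.mem_append]

theorem pvCanon_eq_map (l : List Char) :
    pvCanon l = l.map (fun c => ((pvFirst l c : Nat) : Int)) := by
  have h := pvCanonAux_spec l l [] rfl PySem.Dict.empty []
    (by intro c; simp [PySem.Dict.get?_empty])
  simpa [pvCanon] using h

theorem pvCanon_eq_iff (p w : List Char) (hl : w.length = p.length) :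
    pvCanon w = pvCanon p ↔
      ∀ j (hj : j < p.length) (hj' : j < w.length), pvFirst p p[j] = pvFirst w w[j] := by
  rw [pvCanon_eq_map, pvCanon_eq_map]
  constructor
  · intro h j hj hj'
    have := congrArg (fun t => t[j]?) h
    simp only [List.getElem?_map] at this
    rw [List.getElem?_eq_getElem hj', List.getElem?_eq_getElem hj] at this
    simp only [Option.map_some] at this
    exact_mod_cast (Option.some.inj this).symm
  · intro h
    apply List.ext_getElem (by simp [hl])
    intro j h1 h2
    simp only [List.length_map] at h1 h2
    simp only [List.getElem_map]
    exact_mod_cast (h j h2 h1).symm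

theorem pvWindow (p w : List Char) (hl : w.length = p.length) :
    pvLoopA (p.zip w) PySem.Dict.empty PySem.Set.empty = (pvCanon w == pvCanon p) := by
  rw [Bool.eq_iff_iff, pvLoopA_zip, beq_iff_eq, pvCompat_zip_iff p w hl, pvCanon_eq_iff p w hl]

theorem pvAny_congr_mem {α : Type} : ∀ (l : List α) (p q : α → Bool),
    (∀ a ∈ l, p a = q a) → l.any p = l.any q := by
  intro l p q h
  induction l with
  | nil => rfl
  | cons a t ih =>
    simp only [List.any_cons, h a (by simp), ih (fun x hx => h x (by simp [hx]))]

-- ===== VERDICT (by name: the statement is the Claim_ definition above) =====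
theorem string_pattern_spec : Claim_equal_string_pattern := by
  intro string pattern _
  unfold Spec_string_pattern string_pattern string_pattern_alt
  by_cases hmn : (pattern.toList.length : Int) > (string.toList.length : Int)
  · rw [if_pos hmn, PySem.List.pyRange_one]
    have h0 : ((string.toList.length : Int) - (pattern.toList.length : Int) + 1 - 0).toNat = 0 := by
      omega
    rw [h0]
    simp
  · rw [if_neg hmn]
    apply pvAny_congr_mem
    intro i hi
    rw [PySem.List.mem_pyRange_one] at hi
    obtain ⟨h0, h1⟩ := hi
    have hk : i = ((i.toNat : Nat) : Int) := (Int.toNat_of_nonneg h0).symm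
    rw [hk, PySem.List.slice_natCast_add string.toList i.toNat pattern.toList.length]
    have hlen : ((string.toList.drop i.toNat).take pattern.toList.length).length
        = pattern.toList.length := by
      simp only [List.length_take, List.length_drop]
      omega
    exact pvWindow pattern.toList _ hlen
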